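-- pv_equiv track=rewrite | github.com/volcengine/verl | atropos/environments/intern_bootcamp/internbootcamp_lib/internbootcamp/bootcamp/dshortestandlongestlis/dshortestandlongestlis.py | generate_max_sequence
-- ===== SOURCE A (Python) =====
-- def generate_max_sequence(n, s):
--     a = list(range(1, n+1))
--     i = 0
--     while i < n-1:
--         if s[i] == '>':
--             x = 0
--             j = 0
--             while j < (n-1 - i) and s[i + j] == '>':
--                 x += 1
--                 j += 1
--             sub = a[i:i+x+1][::-1]
--             a[i:i+x+1] = sub
--             i += x
--         i += 1
--     return a
-- ===== SOURCE B (Python) =====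
-- def generate_max_sequence(n, s):
--     res = []
--     start = 0
--     for i in range(n):
--         if i == n - 1 or s[i] != '>':
--             res.extend(range(i + 1, start, -1))
--             start = i + 1
--     return res
-- ===== Notes on version B (the rewrite author's own statement) =====
-- stated objective: simpler
-- what changed: B is a single flush-on-boundary pass that emits each reversed '>'-block directly with a block-start pointer, instead of A's identity array mutated in place via a nested run-length scan and slice reversal.
import Mathlib
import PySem

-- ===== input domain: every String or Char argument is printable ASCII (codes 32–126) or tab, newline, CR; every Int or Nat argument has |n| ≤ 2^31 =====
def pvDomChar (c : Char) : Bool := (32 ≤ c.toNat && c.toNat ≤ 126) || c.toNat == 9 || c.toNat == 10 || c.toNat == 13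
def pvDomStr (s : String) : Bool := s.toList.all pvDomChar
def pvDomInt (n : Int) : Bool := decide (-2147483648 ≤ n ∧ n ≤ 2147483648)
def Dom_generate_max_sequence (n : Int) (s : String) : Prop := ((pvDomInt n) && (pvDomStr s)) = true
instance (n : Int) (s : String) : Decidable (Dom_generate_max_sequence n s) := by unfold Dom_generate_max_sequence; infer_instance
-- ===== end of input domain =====

-- B replaces A's in-place mutation of an identity array (nested run-length scan + slice reversal)
-- by one pass that emits each reversed '>'-block directly from a block-start pointer (objective: simpler).

-- ===== PORT A =====
-- inner while loop of A: state (x, j); returns the final x (a count, kept as Nat: x starts at 0 and only increments)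
def pvInnerA (cs : List Char) (n i : Int) (x : Nat) (j : Int) : Nat :=
  if _h : j < n - 1 - i then
    if PySem.List.pyGet? cs (i + j) = some '>' then
      pvInnerA cs n i (x + 1) (j + 1)
    else x
  else x
termination_by (n - 1 - i - j).toNat
decreasing_by exact (Int.toNat_lt_toNat (Int.sub_pos.mpr _h)).mpr (sub_lt_sub_left (lt_add_one j) _)

-- outer while loop of A: a mutated in place, i the loop index
def pvLoopA (cs : List Char) (n : Int) (a : List Int) (i : Int) : List Int :=
  if _h : i < n - 1 then
    if PySem.List.pyGet? cs i = some '>' then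
      let x : Int := (pvInnerA cs n i 0 0 : Int)
      let sub := (PySem.List.slice a (some i) (some (i + x + 1))).reverse
      let a' := PySem.List.slice a none (some i) ++ sub ++ PySem.List.slice a (some (i + x + 1)) none
      pvLoopA cs n a' (i + x + 1)
    else pvLoopA cs n a (i + 1)
  else a
termination_by (n - 1 - i).toNat
decreasing_by
  · exact (Int.toNat_lt_toNat (Int.sub_pos.mpr _h)).mpr
      (sub_lt_sub_left (Int.lt_add_one_iff.mpr (le_add_of_nonneg_right (Int.natCast_nonneg _))) _)
  · exact (Int.toNat_lt_toNat (Int.sub_pos.mpr _h)).mpr (sub_lt_sub_left (lt_add_one i) _)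

def generate_max_sequence (n : Int) (s : String) : List Int :=
  pvLoopA s.toList n (PySem.List.pyRange 1 (n + 1) 1) 0

-- ===== PORT B =====
def generate_max_sequence_alt (n : Int) (s : String) : List Int :=
  ((PySem.List.pyRange 0 n 1).foldl
    (fun (st : List Int × Int) i =>
      if i = n - 1 ∨ PySem.List.pyGet? s.toList i ≠ some '>' then
        (st.1 ++ PySem.List.pyRange (i + 1) st.2 (-1), i + 1)
      else st)
    ([], 0)).1

-- ===== PRECONDITION & SPEC =====
-- Pre_ excludes exactly the inputs where the Python A raises IndexError (2 ≤ n and len(s) < n-1);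
-- the Python B raises there as well.
def Pre_generate_max_sequence (n : Int) (s : String) : Prop :=
  n ≤ 1 ∨ n - 1 ≤ (s.toList.length : Int)
instance (n : Int) (s : String) : Decidable (Pre_generate_max_sequence n s) := by
  unfold Pre_generate_max_sequence; infer_instance

def pvWitness_generate_max_sequence : Int × String := (3, "><")

def Spec_generate_max_sequence (n : Int) (s : String) (out : List Int) : Prop := out = generate_max_sequence_alt n s
instance (n : Int) (s : String) (out : List Int) : Decidable (Spec_generate_max_sequence n s out) := by unfold Spec_generate_max_sequence; infer_instance

-- ===== CLAIM (what is proved, stated in full; the proofs are below) =====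
def Claim_equal_generate_max_sequence : Prop := ∀ (n : Int) (s : String), Dom_generate_max_sequence n s → Pre_generate_max_sequence n s → Spec_generate_max_sequence n s (generate_max_sequence n s)

-- ===== LEMMAS AND PROOFS =====

-- the common output: blocks emitted left to right, each maximal '>'-run reversed
def pvEmit (cs : List Char) (n : Int) (i : Int) : List Int :=
  if _h : i < n - 1 then
    if PySem.List.pyGet? cs i = some '>' then
      PySem.List.pyRange (i + (pvInnerA cs n i 0 0 : Int) + 1) i (-1) ++
        pvEmit cs n (i + (pvInnerA cs n i 0 0 : Int) + 1)
    else (i + 1) :: pvEmit cs n (i + 1)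
  else PySem.List.pyRange (i + 1) (n + 1) 1
termination_by (n - 1 - i).toNat
decreasing_by
  · exact (Int.toNat_lt_toNat (Int.sub_pos.mpr _h)).mpr
      (sub_lt_sub_left (Int.lt_add_one_iff.mpr (le_add_of_nonneg_right (Int.natCast_nonneg _))) _)
  · exact (Int.toNat_lt_toNat (Int.sub_pos.mpr _h)).mpr (sub_lt_sub_left (lt_add_one i) _)

-- full characterisation of A's inner run-length loop
theorem pvInnerA_spec (cs : List Char) (n i : Int) :
    ∀ (j : Int) (x : Nat), j ≤ n - 1 - i →
    ∃ e : Nat, pvInnerA cs n i x j = x + e ∧ j + (e : Int) ≤ n - 1 - i ∧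
      (∀ k : Int, j ≤ k → k < j + (e : Int) → PySem.List.pyGet? cs (i + k) = some '>') ∧
      (i + (j + (e : Int)) = n - 1 ∨ PySem.List.pyGet? cs (i + (j + (e : Int))) ≠ some '>') := by
  intro j x hj
  unfold pvInnerA
  split
  · rename_i hlt
    split
    · rename_i hc
      obtain ⟨e, h1, h3, h4, h5⟩ := pvInnerA_spec cs n i (j + 1) (x + 1) (by omega)
      refine ⟨e + 1, by omega, by push_cast; omega, ?_, ?_⟩
      · intro k hk1 hk2
        by_cases hkj : k = j
        · subst hkj; exact hc
        · exact h4 k (by omega) (by push_cast at hk2 ⊢; omega)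
      · have harith : j + ((e + 1 : Nat) : Int) = (j + 1) + (e : Int) := by push_cast; ring
        rw [harith]; exact h5
    · exact ⟨0, by omega, by omega, by omega, by simp_all⟩
  · exact ⟨0, by omega, by omega, by omega, by omega⟩
termination_by j x => (n - 1 - i - j).toNat
decreasing_by omega

-- A's loop, with the already-final prefix p split off the array
theorem pvLoopA_emit (cs : List Char) (n : Int) :
    ∀ (i : Int) (p : List Int), 0 ≤ i → p.length = i.toNat →
    pvLoopA cs n (p ++ PySem.List.pyRange (i + 1) (n + 1) 1) i = p ++ pvEmit cs n i := by
  intro i p hi hp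
  rw [pvLoopA, pvEmit]
  split
  · rename_i hlt
    split
    · rename_i hc
      obtain ⟨x, hx1, hx3, -, -⟩ := pvInnerA_spec cs n i 0 0 (by omega)
      simp only [zero_add] at hx1 hx3
      simp only [hx1]
      have hsplit : PySem.List.pyRange (i + 1) (n + 1) 1 =
          PySem.List.pyRange (i + 1) (i + x + 2) 1 ++ PySem.List.pyRange (i + x + 2) (n + 1) 1 :=
        PySem.List.pyRange_one_append _ _ _ (by omega) (by omega)
      have hlen1 : (PySem.List.pyRange (i + 1) (i + x + 2) 1).length = x + 1 := by
        rw [PySem.List.length_pyRange_one]; omega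
      have hdrop : (p ++ PySem.List.pyRange (i + 1) (n + 1) 1).drop i.toNat =
          PySem.List.pyRange (i + 1) (n + 1) 1 := by
        rw [← hp]; exact List.drop_left
      have hslice : PySem.List.slice (p ++ PySem.List.pyRange (i + 1) (n + 1) 1) (some i) (some (i + x + 1)) =
          PySem.List.pyRange (i + 1) (i + x + 2) 1 := by
        rw [PySem.List.slice_toNat _ hi (by omega), hdrop, hsplit]
        have hcnt : (i + x + 1).toNat - i.toNat = (PySem.List.pyRange (i + 1) (i + x + 2) 1).length := by
          rw [hlen1]; omega
        rw [hcnt, List.take_left]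
      have hpre : PySem.List.slice (p ++ PySem.List.pyRange (i + 1) (n + 1) 1) none (some i) = p := by
        rw [PySem.List.slice_to _ hi, ← hp, List.take_left]
      have hsuf : PySem.List.slice (p ++ PySem.List.pyRange (i + 1) (n + 1) 1) (some (i + x + 1)) none =
          PySem.List.pyRange (i + x + 2) (n + 1) 1 := by
        rw [PySem.List.slice_from _ (by omega), hsplit, ← List.append_assoc]
        have hcnt : (i + x + 1).toNat = (p ++ PySem.List.pyRange (i + 1) (i + x + 2) 1).length := by
          rw [List.length_append, hp, hlen1]; omega
        rw [hcnt, List.drop_left]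
      rw [hslice, hpre, hsuf, PySem.List.pyRange_neg_one_eq_reverse,
        show i + x + 1 + 1 = i + x + 2 by ring]
      have hrec := pvLoopA_emit cs n (i + x + 1) (p ++ (PySem.List.pyRange (i + 1) (i + x + 2) 1).reverse)
        (by omega)
        (by rw [List.length_append, List.length_reverse, hp, hlen1]; omega)
      rw [show i + x + 1 + 1 = i + x + 2 by ring] at hrec
      rw [hrec, List.append_assoc]
    · rename_i hc
      have hcons : PySem.List.pyRange (i + 1) (n + 1) 1 =
          (i + 1) :: PySem.List.pyRange (i + 1 + 1) (n + 1) 1 :=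
        PySem.List.pyRange_one_cons (by omega)
      have hrec := pvLoopA_emit cs n (i + 1) (p ++ [i + 1]) (by omega)
        (by rw [List.length_append, List.length_singleton, hp]; omega)
      have harg : p ++ PySem.List.pyRange (i + 1) (n + 1) 1 =
          (p ++ [i + 1]) ++ PySem.List.pyRange (i + 1 + 1) (n + 1) 1 := by
        rw [hcons, List.append_assoc, List.singleton_append]
      rw [harg, hrec, List.append_assoc, List.singleton_append]
  · rfl
termination_by i p => (n - 1 - i).toNat
decreasing_by all_goals omega

-- B's fold, one block at a time (state invariant: start pointer = current index)
theorem pvFoldB_emit (cs : List Char) (n : Int) :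
    ∀ (i : Int) (res : List Int), 0 ≤ i →
    ((PySem.List.pyRange i n 1).foldl
      (fun (st : List Int × Int) k =>
        if k = n - 1 ∨ PySem.List.pyGet? cs k ≠ some '>' then
          (st.1 ++ PySem.List.pyRange (k + 1) st.2 (-1), k + 1)
        else st)
      (res, i)).1 = res ++ pvEmit cs n i := by
  intro i res hi
  by_cases hin : i < n
  · by_cases hlt : i < n - 1
    · by_cases hc : PySem.List.pyGet? cs i = some '>'
      · obtain ⟨x, hx1, hx3, hall, hstop⟩ := pvInnerA_spec cs n i 0 0 (by omega)
        simp only [zero_add] at hx1 hx3 hall hstop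
        rw [PySem.List.pyRange_one_append i (i + x) n (by omega) (by omega), List.foldl_append]
        have hskip := PySem.List.foldl_congr_mem
          (l := PySem.List.pyRange i (i + x) 1) (init := ((res, i) : List Int × Int))
          (f := fun (st : List Int × Int) k =>
            if k = n - 1 ∨ PySem.List.pyGet? cs k ≠ some '>' then
              (st.1 ++ PySem.List.pyRange (k + 1) st.2 (-1), k + 1)
            else st)
          (g := fun st _ => st)
          (by
            intro acc k hk
            rw [PySem.List.mem_pyRange_one] at hk
            have h1 : ¬ (k = n - 1) := by omega
            have h2 : PySem.List.pyGet? cs k = some '>' := by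
              have := hall (k - i) (by omega) (by omega)
              simpa [show i + (k - i) = k by omega] using this
            simp [h1, h2])
        rw [hskip, PySem.List.foldl_ignore,
          PySem.List.pyRange_one_cons (show i + x < n by omega), List.foldl_cons]
        have hflush : ((i + x = n - 1) ∨ ¬ (PySem.List.pyGet? cs (i + x) = some '>')) := by
          rcases hstop with h | h
          · left; omega
          · right; exact h
        rw [if_pos hflush]
        have hrec := pvFoldB_emit cs n (i + x + 1) (res ++ PySem.List.pyRange (i + x + 1) i (-1)) (by omega)
        rw [hrec]
        conv_rhs => rw [pvEmit, dif_pos hlt, if_pos hc, hx1]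
        rw [List.append_assoc]
      · rw [PySem.List.pyRange_one_cons (by omega), List.foldl_cons, if_pos (Or.inr hc)]
        have hrec := pvFoldB_emit cs n (i + 1) (res ++ PySem.List.pyRange (i + 1) i (-1)) (by omega)
        rw [hrec]
        conv_rhs => rw [pvEmit, dif_pos hlt, if_neg hc]
        have h1 : PySem.List.pyRange (i + 1) i (-1) = [i + 1] := by
          rw [PySem.List.pyRange_neg_one_cons (by omega), PySem.List.pyRange_neg_one_eq_nil (by omega)]
        rw [h1, List.append_assoc, List.singleton_append]
    · rw [PySem.List.pyRange_one_cons (by omega), PySem.List.pyRange_one_eq_nil (by omega),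
        List.foldl_cons, if_pos (Or.inl (by omega)), List.foldl_nil]
      rw [pvEmit, dif_neg hlt]
      have h1 : PySem.List.pyRange (i + 1) i (-1) = [i + 1] := by
        rw [PySem.List.pyRange_neg_one_cons (by omega), PySem.List.pyRange_neg_one_eq_nil (by omega)]
      have h2 : PySem.List.pyRange (i + 1) (n + 1) 1 = [i + 1] := by
        rw [show (n : Int) + 1 = (i + 1) + 1 by omega]
        exact PySem.List.pyRange_one_singleton _
      rw [h1, h2]
  · rw [PySem.List.pyRange_one_eq_nil (by omega), List.foldl_nil]
    rw [pvEmit, dif_neg (by omega), PySem.List.pyRange_one_eq_nil (by omega), List.append_nil]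
termination_by i res => (n - i).toNat
decreasing_by all_goals omega

-- ===== VERDICT (by name: the statement is the Claim_ definition above) =====
theorem generate_max_sequence_spec : Claim_equal_generate_max_sequence := by
  intro n s _ _
  unfold Spec_generate_max_sequence generate_max_sequence generate_max_sequence_alt
  have hA := pvLoopA_emit s.toList n 0 [] (by omega) (by simp)
  have hB := pvFoldB_emit s.toList n 0 [] (by omega)
  simp only [List.nil_append, show (0 : Int) + 1 = 1 from rfl] at hA hB
  rw [hA, hB]
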